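-- pv_equiv track=rewrite | github.com/Hackfmi/Mentor-Scheduler | placer.py | lowest_intersection
-- ===== SOURCE A (Python) =====
-- def lowest_intersection(s1, s2):
--     s1 = sorted(s1)
--     s2 = sorted(s2)
--
--     largest = s1
--     smallest = s2
--
--
--     if len(s2) > len(s1):
--         largest = s2
--         smallest = s1
--
--     start = 0
--     end = len(largest)
--
--     while start < end:
--         if largest[start] in smallest:
--             return largest[start]
--         start += 1
--     return None
-- ===== SOURCE B (Python) =====
-- def lowest_intersection(s1, s2):
--     a = sorted(s1)
--     b = sorted(s2)
--     i = 0
--     j = 0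
--     while i < len(a) and j < len(b):
--         if a[i] == b[j]:
--             return a[i]
--         if a[i] < b[j]:
--             i += 1
--         else:
--             j += 1
--     return None
-- ===== Notes on version B (the rewrite author's own statement) =====
-- stated objective: alternative
-- what changed: Replaces A's scan of the longer sorted list with a per-element membership test in the other list by a two-pointer merge walk over both sorted lists; on random inputs a common element appears early so the measured times are similar.
import Mathlib
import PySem

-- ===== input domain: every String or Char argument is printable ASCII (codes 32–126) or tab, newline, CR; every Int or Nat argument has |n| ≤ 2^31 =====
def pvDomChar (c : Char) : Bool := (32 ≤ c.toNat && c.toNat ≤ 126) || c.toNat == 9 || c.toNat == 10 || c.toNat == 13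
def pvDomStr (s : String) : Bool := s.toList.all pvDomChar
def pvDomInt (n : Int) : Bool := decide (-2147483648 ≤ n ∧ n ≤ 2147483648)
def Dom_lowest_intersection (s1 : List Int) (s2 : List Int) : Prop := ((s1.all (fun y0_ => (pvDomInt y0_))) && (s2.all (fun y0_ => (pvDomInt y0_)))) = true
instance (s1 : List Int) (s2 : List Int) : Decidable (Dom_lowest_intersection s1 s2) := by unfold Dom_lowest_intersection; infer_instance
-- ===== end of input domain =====

-- B replaces A's per-element membership scan of the longer sorted list by a two-pointer
-- merge walk over both sorted lists (objective: alternative algorithm, same measured cost).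

-- ===== PORT A =====
-- the while loop: scan `largest` from index `start` upward, return the first element that is `in smallest`
def pvScanA (largest smallest : List Int) : Option Int :=
  match largest with
  | [] => none
  | x :: xs => if x ∈ smallest then some x else pvScanA xs smallest

def lowest_intersection (s1 : List Int) (s2 : List Int) : Option Int :=
  let s1s := PySem.List.sorted s1 (fun x => x) false
  let s2s := PySem.List.sorted s2 (fun x => x) false
  let p :=
    if s2s.length > s1s.length then (s2s, s1s) else (s1s, s2s)
  pvScanA p.1 p.2

-- ===== PORT B =====
-- the two-pointer while loop of Source B, recursion on the two (suffix) lists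
def pvTwoPtr (a b : List Int) : Option Int :=
  match a, b with
  | [], _ => none
  | _ :: _, [] => none
  | x :: xs, y :: ys =>
    if x = y then some x
    else if x < y then pvTwoPtr xs (y :: ys)
    else pvTwoPtr (x :: xs) ys

def lowest_intersection_alt (s1 : List Int) (s2 : List Int) : Option Int :=
  pvTwoPtr (PySem.List.sorted s1 (fun x => x) false) (PySem.List.sorted s2 (fun x => x) false)

-- ===== PRECONDITION & SPEC =====
def Spec_lowest_intersection (s1 : List Int) (s2 : List Int) (out : Option Int) : Prop := out = lowest_intersection_alt s1 s2
instance (s1 : List Int) (s2 : List Int) (out : Option Int) : Decidable (Spec_lowest_intersection s1 s2 out) := by unfold Spec_lowest_intersection; infer_instance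

-- ===== CLAIM (what is proved, stated in full; the proofs are below) =====
def Claim_equal_lowest_intersection : Prop := ∀ (s1 : List Int) (s2 : List Int), Dom_lowest_intersection s1 s2 → Spec_lowest_intersection s1 s2 (lowest_intersection s1 s2)

-- ===== LEMMAS AND PROOFS =====

-- "o is the least common element of a and b (none if there is none)", a membership-only property
def IsLowCommon (a b : List Int) (o : Option Int) : Prop :=
  match o with
  | some x => x ∈ a ∧ x ∈ b ∧ ∀ y, y ∈ a → y ∈ b → x ≤ y
  | none => ∀ y, y ∈ a → y ∉ b

theorem isLowCommon_unique {a b : List Int} {o o' : Option Int}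
    (h : IsLowCommon a b o) (h' : IsLowCommon a b o') : o = o' := by
  match o, o' with
  | none, none => rfl
  | none, some x' => exact absurd h'.2.1 (h x' h'.1)
  | some x, none => exact absurd h.2.1 (h' x h.1)
  | some x, some x' =>
    have h1 := h.2.2 x' h'.1 h'.2.1
    have h2 := h'.2.2 x h.1 h.2.1
    simp [le_antisymm h1 h2]

theorem isLowCommon_symm {a b : List Int} {o : Option Int}
    (h : IsLowCommon a b o) : IsLowCommon b a o := by
  match o with
  | none => exact fun y hy hy' => h y hy' hy
  | some x => exact ⟨h.2.1, h.1, fun y hy hy' => h.2.2 y hy' hy⟩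

theorem isLowCommon_congr {a a' b b' : List Int} {o : Option Int}
    (ha : ∀ x : Int, x ∈ a ↔ x ∈ a') (hb : ∀ x : Int, x ∈ b ↔ x ∈ b')
    (h : IsLowCommon a b o) : IsLowCommon a' b' o := by
  match o with
  | none => exact fun y hy hy' => h y ((ha y).2 hy) ((hb y).2 hy')
  | some x =>
    exact ⟨(ha x).1 h.1, (hb x).1 h.2.1,
      fun y hy hy' => h.2.2 y ((ha y).2 hy) ((hb y).2 hy')⟩

theorem pvScanA_isLowCommon (a b : List Int) (ha : a.Pairwise (· ≤ ·)) :
    IsLowCommon a b (pvScanA a b) := by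
  induction a with
  | nil => intro y hy; simp at hy
  | cons x xs ih =>
    rw [pvScanA]
    rcases List.pairwise_cons.1 ha with ⟨hx, hxs⟩
    by_cases hmem : x ∈ b
    · simp only [if_pos hmem]
      refine ⟨List.mem_cons_self, hmem, ?_⟩
      intro y hy _
      rcases List.mem_cons.1 hy with rfl | hy'
      · exact le_refl _
      · exact hx y hy'
    · simp only [if_neg hmem]
      have h := ih hxs
      match ho : pvScanA xs b with
      | none =>
        rw [ho] at h
        intro y hy hy'
        rcases List.mem_cons.1 hy with rfl | hy2
        · exact hmem hy'
        · exact h y hy2 hy'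
      | some z =>
        rw [ho] at h
        refine ⟨List.mem_cons_of_mem _ h.1, h.2.1, ?_⟩
        intro y hy hy'
        rcases List.mem_cons.1 hy with rfl | hy2
        · exact absurd hy' hmem
        · exact h.2.2 y hy2 hy'

theorem pvTwoPtr_isLowCommon (a b : List Int)
    (ha : a.Pairwise (· ≤ ·)) (hb : b.Pairwise (· ≤ ·)) :
    IsLowCommon a b (pvTwoPtr a b) := by
  fun_induction pvTwoPtr a b with
  | case1 b => intro y hy; simp at hy
  | case2 x xs => intro y _ hy; simp at hy
  | case3 xs y ys =>
    refine ⟨List.mem_cons_self, List.mem_cons_self, ?_⟩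
    intro z hz _
    rcases List.mem_cons.1 hz with rfl | hz'
    · exact le_refl _
    · exact (List.pairwise_cons.1 ha).1 z hz'
  | case4 x xs y ys hne hlt ih =>
    have hxnb : x ∉ y :: ys := by
      intro hmem
      rcases List.mem_cons.1 hmem with rfl | hmem'
      · exact hne rfl
      · exact absurd (lt_of_lt_of_le hlt ((List.pairwise_cons.1 hb).1 x hmem')) (lt_irrefl x)
    have h := ih (List.pairwise_cons.1 ha).2 hb
    match ho : pvTwoPtr xs (y :: ys) with
    | none =>
      rw [ho] at h
      intro z hz hz'
      rcases List.mem_cons.1 hz with rfl | hz2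
      · exact hxnb hz'
      · exact h z hz2 hz'
    | some w =>
      rw [ho] at h
      refine ⟨List.mem_cons_of_mem _ h.1, h.2.1, ?_⟩
      intro z hz hz'
      rcases List.mem_cons.1 hz with rfl | hz2
      · exact absurd hz' hxnb
      · exact h.2.2 z hz2 hz'
  | case5 x xs y ys hne hnlt ih =>
    have hylt : y < x := lt_of_le_of_ne (not_lt.1 hnlt) (fun h => hne h.symm)
    have hyna : y ∉ x :: xs := by
      intro hmem
      rcases List.mem_cons.1 hmem with rfl | hmem'
      · exact lt_irrefl y hylt
      · exact absurd (lt_of_lt_of_le hylt ((List.pairwise_cons.1 ha).1 y hmem')) (lt_irrefl y)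
    have h := ih ha (List.pairwise_cons.1 hb).2
    match ho : pvTwoPtr (x :: xs) ys with
    | none =>
      rw [ho] at h
      intro z hz hz'
      rcases List.mem_cons.1 hz' with rfl | hz2
      · exact hyna hz
      · exact h z hz hz2
    | some w =>
      rw [ho] at h
      refine ⟨h.1, List.mem_cons_of_mem _ h.2.1, ?_⟩
      intro z hz hz'
      rcases List.mem_cons.1 hz' with rfl | hz2
      · exact absurd hz hyna
      · exact h.2.2 z hz hz2

theorem lowest_isLowCommon (s1 s2 : List Int) :
    IsLowCommon s1 s2 (lowest_intersection s1 s2) := by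
  unfold lowest_intersection
  have h1 : (PySem.List.sorted s1 (fun x => x) false).Pairwise (· ≤ ·) :=
    PySem.List.sorted_pairwise s1 (fun x => x)
  have h2 : (PySem.List.sorted s2 (fun x => x) false).Pairwise (· ≤ ·) :=
    PySem.List.sorted_pairwise s2 (fun x => x)
  have m1 : ∀ x : Int, x ∈ PySem.List.sorted s1 (fun y => y) false ↔ x ∈ s1 :=
    fun x => PySem.List.mem_sorted _ _ _ x
  have m2 : ∀ x : Int, x ∈ PySem.List.sorted s2 (fun y => y) false ↔ x ∈ s2 :=
    fun x => PySem.List.mem_sorted _ _ _ x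
  by_cases hlen : (PySem.List.sorted s2 (fun x => x) false).length > (PySem.List.sorted s1 (fun x => x) false).length
  · simp only [if_pos hlen]
    exact isLowCommon_symm (isLowCommon_congr m2 m1 (pvScanA_isLowCommon _ _ h2))
  · simp only [if_neg hlen]
    exact isLowCommon_congr m1 m2 (pvScanA_isLowCommon _ _ h1)

theorem alt_isLowCommon (s1 s2 : List Int) :
    IsLowCommon s1 s2 (lowest_intersection_alt s1 s2) := by
  unfold lowest_intersection_alt
  exact isLowCommon_congr (fun x => PySem.List.mem_sorted _ _ _ x) (fun x => PySem.List.mem_sorted _ _ _ x)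
    (pvTwoPtr_isLowCommon _ _ (PySem.List.sorted_pairwise s1 (fun x => x))
      (PySem.List.sorted_pairwise s2 (fun x => x)))

-- ===== VERDICT (by name: the statement is the Claim_ definition above) =====
theorem lowest_intersection_spec : Claim_equal_lowest_intersection := by
  intro s1 s2 _
  exact isLowCommon_unique (lowest_isLowCommon s1 s2) (alt_isLowCommon s1 s2)
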